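-- pv_equiv track=rewrite | github.com/jeanfredericplante/decrypt_the_sentence | generate_pdf.py | grouped_by_line
-- ===== SOURCE A (Python) =====
-- def grouped_by_line(sentence_coded, max_char_line = 10):
--
--   cline = []
--   array_to_write = []
--   for w in sentence_coded:
--     clinelen = sum([len(wc) for wc in cline])
--     if (clinelen + len(w)) >= max_char_line:
--       array_to_write.append(cline)
--       cline = []
--     cline.append(w)
--     cline.append(" ")
--   array_to_write.append(cline)
--   return array_to_write
-- ===== SOURCE B (Python) =====
-- def grouped_by_line(sentence_coded, max_char_line=10):
--     # Pass 1: group words only, tracking a running length (word + one space each).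
--     groups = [[]]
--     run = 0
--     for w in sentence_coded:
--         if run + len(w) >= max_char_line:
--             groups.append([])
--             run = 0
--         groups[-1].append(w)
--         run += len(w) + 1
--     # Pass 2: render each group by following every word with a " ".
--     return [[piece for w in g for piece in (w, " ")] for g in groups]
-- ===== Notes on version B (the rewrite author's own statement) =====
-- stated objective: faster
-- what changed: B replaces A's per-word re-summation of the current line (quadratic in words per line) with a single running-length counter over bare words, and renders the space-interleaved lines in a separate second pass.
import Mathlib
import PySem

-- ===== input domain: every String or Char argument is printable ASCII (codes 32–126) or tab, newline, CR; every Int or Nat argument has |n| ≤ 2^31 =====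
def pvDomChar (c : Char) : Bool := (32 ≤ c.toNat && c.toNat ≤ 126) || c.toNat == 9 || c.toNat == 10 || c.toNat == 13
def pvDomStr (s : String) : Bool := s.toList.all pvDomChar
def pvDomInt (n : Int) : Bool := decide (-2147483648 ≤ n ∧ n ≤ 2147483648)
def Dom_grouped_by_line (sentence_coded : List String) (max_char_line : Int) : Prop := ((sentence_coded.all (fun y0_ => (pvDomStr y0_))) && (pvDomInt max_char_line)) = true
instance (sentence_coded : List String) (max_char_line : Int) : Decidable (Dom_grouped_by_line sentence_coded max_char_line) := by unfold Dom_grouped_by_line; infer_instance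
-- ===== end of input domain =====

-- B re-splits the work into a grouping pass over bare words with one running length counter
-- (instead of re-summing the space-interleaved current line per word) plus a rendering pass.

-- ===== PORT A =====
-- state: (cline, array_to_write)
def grouped_by_line (sentence_coded : List String) (max_char_line : Int) : List (List String) :=
  let st := sentence_coded.foldl
    (fun (st : List String × List (List String)) w =>
      let clinelen : Int := (st.1.map (fun wc => PySem.Str.len wc)).sum
      let st :=
        if clinelen + PySem.Str.len w ≥ max_char_line then
          (([] : List String), st.2 ++ [st.1])
        else st
      (st.1 ++ [w, " "], st.2))
    (([] : List String), ([] : List (List String)))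
  st.2 ++ [st.1]

-- ===== PORT B =====
-- B helper: pass 2, render one group by following each word with " "
def pvRender (g : List String) : List String := g.flatMap (fun w => [w, " "])

-- state: (done groups, current group, running length)
def grouped_by_line_alt (sentence_coded : List String) (max_char_line : Int) : List (List String) :=
  let st := sentence_coded.foldl
    (fun (st : List (List String) × List String × Int) w =>
      let st :=
        if st.2.2 + PySem.Str.len w ≥ max_char_line then
          (st.1 ++ [st.2.1], ([] : List String), (0 : Int))
        else st
      (st.1, st.2.1 ++ [w], st.2.2 + PySem.Str.len w + 1))
    (([] : List (List String)), ([] : List String), (0 : Int))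
  (st.1 ++ [st.2.1]).map pvRender

-- ===== PRECONDITION & SPEC =====
def Spec_grouped_by_line (sentence_coded : List String) (max_char_line : Int) (out : List (List String)) : Prop := out = grouped_by_line_alt sentence_coded max_char_line
instance (sentence_coded : List String) (max_char_line : Int) (out : List (List String)) : Decidable (Spec_grouped_by_line sentence_coded max_char_line out) := by unfold Spec_grouped_by_line; infer_instance

-- ===== CLAIM (what is proved, stated in full; the proofs are below) =====
def Claim_equal_grouped_by_line : Prop := ∀ (sentence_coded : List String) (max_char_line : Int), Dom_grouped_by_line sentence_coded max_char_line → Spec_grouped_by_line sentence_coded max_char_line (grouped_by_line sentence_coded max_char_line)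

-- ===== LEMMAS AND PROOFS =====

-- the rendered line's total length equals the running counter (each word + one space)
theorem pvRender_len (g : List String) :
    ((pvRender g).map (fun wc => PySem.Str.len wc)).sum
      = (g.map (fun w => PySem.Str.len w + 1)).sum := by
  induction g with
  | nil => rfl
  | cons w g ih =>
      simp only [pvRender, List.flatMap_cons, List.map_append, List.map_cons, List.sum_append,
        List.sum_cons, List.map_nil, List.sum_nil] at ih ⊢
      rw [ih]
      simp [PySem.Str.len]

theorem pvRender_append (g : List String) (w : String) :
    pvRender (g ++ [w]) = pvRender g ++ [w, " "] := by
  simp [pvRender]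

-- loop invariant: A's state is the rendered image of B's state, and B's counter
-- is the current rendered line's total length
theorem pv_loop (ws : List String) (m : Int) (done : List (List String)) (cur : List String)
    (r : Int) (hr : r = (cur.map (fun w => PySem.Str.len w + 1)).sum) :
    (ws.foldl
      (fun (st : List String × List (List String)) w =>
        let clinelen : Int := (st.1.map (fun wc => PySem.Str.len wc)).sum
        let st :=
          if clinelen + PySem.Str.len w ≥ m then
            (([] : List String), st.2 ++ [st.1])
          else st
        (st.1 ++ [w, " "], st.2))
      (pvRender cur, done.map pvRender)) =
    (fun (st : List (List String) × List String × Int) => (pvRender st.2.1, st.1.map pvRender))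
      (ws.foldl
        (fun (st : List (List String) × List String × Int) w =>
          let st :=
            if st.2.2 + PySem.Str.len w ≥ m then
              (st.1 ++ [st.2.1], ([] : List String), (0 : Int))
            else st
          (st.1, st.2.1 ++ [w], st.2.2 + PySem.Str.len w + 1))
        (done, cur, r)) := by
  induction ws generalizing done cur r with
  | nil => rfl
  | cons w ws ih =>
      have hlen : ((pvRender cur).map (fun wc => PySem.Str.len wc)).sum = r := by
        rw [hr, pvRender_len]
      simp only [List.foldl_cons, hlen]
      by_cases h : r + PySem.Str.len w ≥ m
      · simp only [if_pos h]
        have := ih (done ++ [cur]) [w] (0 + PySem.Str.len w + 1)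
          (by simp [PySem.Str.len])
        simpa [pvRender] using this
      · simp only [if_neg h]
        have := ih done (cur ++ [w]) (r + PySem.Str.len w + 1)
          (by simp [hr]; omega)
        rw [pvRender_append] at this
        simpa using this

-- ===== VERDICT (by name: the statement is the Claim_ definition above) =====
theorem grouped_by_line_spec : Claim_equal_grouped_by_line := by
  intro ws m _
  show grouped_by_line ws m = grouped_by_line_alt ws m
  unfold grouped_by_line grouped_by_line_alt
  have := pv_loop ws m [] [] 0 (by simp)
  simp only [pvRender, List.flatMap_nil, List.map_nil] at this
  rw [this]
  simp [pvRender]
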